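-- pv_equiv track=rewrite | github.com/Krzemon/OOP | Python/lab02/main.py | create_even_odd_dict
-- ===== SOURCE A (Python) =====
-- def create_even_odd_dict(random_values):
--     """Tworzy dwa słowniki dla wartości parzystych i nieparzystych."""
--     even_dict = {}
--     odd_dict = {}
--     for index, value in enumerate(random_values):
--         if value % 2 == 0:
--             even_dict.setdefault(value, []).append(index)
--         else:
--             odd_dict.setdefault(value, []).append(index)
--     return even_dict, odd_dict
-- ===== SOURCE B (Python) =====
-- def create_even_odd_dict(random_values):
--     """Tworzy dwa słowniki dla wartości parzystych i nieparzystych."""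
--     groups = {}
--     for index, value in enumerate(random_values):
--         groups.setdefault(value, []).append(index)
--     even_dict = {v: idx for v, idx in groups.items() if v % 2 == 0}
--     odd_dict = {v: idx for v, idx in groups.items() if v % 2 != 0}
--     return even_dict, odd_dict
-- ===== Notes on version B (the rewrite author's own statement) =====
-- stated objective: alternative
-- what changed: Instead of branching on parity inside the loop and maintaining two dicts, B builds one combined value->indices grouping dict in a single unconditional pass and then derives the two outputs by two comprehension filters over the grouped items.
import Mathlib
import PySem

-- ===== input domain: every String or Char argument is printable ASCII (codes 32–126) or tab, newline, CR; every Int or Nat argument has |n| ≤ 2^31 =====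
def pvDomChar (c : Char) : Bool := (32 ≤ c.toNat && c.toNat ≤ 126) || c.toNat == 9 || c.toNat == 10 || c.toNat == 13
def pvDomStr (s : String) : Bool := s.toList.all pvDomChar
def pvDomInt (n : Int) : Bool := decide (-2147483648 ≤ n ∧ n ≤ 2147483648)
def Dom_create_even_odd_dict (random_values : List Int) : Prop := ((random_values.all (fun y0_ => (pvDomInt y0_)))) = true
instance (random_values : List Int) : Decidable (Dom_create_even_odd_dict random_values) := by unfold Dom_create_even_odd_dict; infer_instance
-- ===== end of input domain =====

-- B replaces A's in-loop parity branching over two dicts by one combined grouping pass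
-- followed by two parity filters over the grouped items (alternative decomposition, same cost).


-- ===== PORT A =====
-- 'd.setdefault(value, []).append(index)' is 'd[value] = d.get(value, []) + [index]', i.e. Dict.modify (exact).
def create_even_odd_dict (random_values : List Int) : (List (Int × List Int)) × (List (Int × List Int)) :=
  let r := (PySem.List.enumerate random_values).foldl
    (fun (st : PySem.Dict Int (List Int) × PySem.Dict Int (List Int)) p =>
      if PySem.Int.mod p.2 2 == 0 then
        (st.1.modify p.2 [] (· ++ [p.1]), st.2)
      else
        (st.1, st.2.modify p.2 [] (· ++ [p.1])))
    (PySem.Dict.empty, PySem.Dict.empty)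
  (r.1.items, r.2.items)

-- ===== PORT B =====
-- the two dict comprehensions over groups.items() are filters of the items list (keys already unique, in order)
def create_even_odd_dict_alt (random_values : List Int) : (List (Int × List Int)) × (List (Int × List Int)) :=
  let groups := (PySem.List.enumerate random_values).foldl
    (fun (d : PySem.Dict Int (List Int)) p => d.modify p.2 [] (· ++ [p.1]))
    PySem.Dict.empty
  (groups.items.filter (fun q => PySem.Int.mod q.1 2 == 0),
   groups.items.filter (fun q => !(PySem.Int.mod q.1 2 == 0)))

-- ===== PRECONDITION & SPEC =====
def Spec_create_even_odd_dict (random_values : List Int) (out : (List (Int × List Int)) × (List (Int × List Int))) : Prop := out = create_even_odd_dict_alt random_values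
instance (random_values : List Int) (out : (List (Int × List Int)) × (List (Int × List Int))) : Decidable (Spec_create_even_odd_dict random_values out) := by unfold Spec_create_even_odd_dict; infer_instance

-- ===== CLAIM (what is proved, stated in full; the proofs are below) =====
def Claim_equal_create_even_odd_dict : Prop := ∀ (random_values : List Int), Dom_create_even_odd_dict random_values → Spec_create_even_odd_dict random_values (create_even_odd_dict random_values)

-- ===== LEMMAS AND PROOFS =====

-- keys of a dict whose items are a key-filter of g's items form a sublist of g's keys
theorem pv_keys_filter_nodup (g : PySem.Dict Int (List Int)) (Q : Int → Bool)
    (hg : g.keys.Nodup) : ((g.items.filter (fun q => Q q.1)).map (·.1)).Nodup := by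
  have hsub : List.Sublist ((g.items.filter (fun q => Q q.1)).map (·.1)) (g.items.map (·.1)) :=
    List.Sublist.map _ (List.filter_sublist (p := fun q => Q q.1) (l := g.items))
  exact hsub.nodup hg

-- a modify at a key v with Q v = true commutes with key-filtering by Q
theorem pv_step_true (g d : PySem.Dict Int (List Int)) (Q : Int → Bool) (v : Int) (i : Int)
    (hQ : Q v = true) (hg : g.keys.Nodup)
    (hd : d.items = g.items.filter (fun q => Q q.1)) :
    (d.modify v [] (· ++ [i])).items
      = (g.modify v [] (· ++ [i])).items.filter (fun q => Q q.1) := by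
  simp only [PySem.Dict.modify]
  by_cases hc : g.contains v = true
  · -- v is already a key of g, hence of d
    obtain ⟨w, hw⟩ : ∃ w, (v, w) ∈ g.items := by
      have hv : v ∈ g.items.map (·.1) := by
        have := (PySem.Dict.contains_iff_mem_keys (d := g) (k := v)).mp hc
        simpa [PySem.Dict.keys] using this
      obtain ⟨p, hp, hp1⟩ := List.mem_map.mp hv
      exact ⟨p.2, by simpa [← hp1] using hp⟩
    have hgD : g.getD v [] = w := PySem.Dict.getD_of_mem_items g hw hg []
    have hwd : (v, w) ∈ d.items := by
      rw [hd]; exact List.mem_filter.mpr ⟨hw, by simpa using hQ⟩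
    have hdnod : d.keys.Nodup := by
      simpa [PySem.Dict.keys, hd] using pv_keys_filter_nodup g Q hg
    have hdD : d.getD v [] = w := PySem.Dict.getD_of_mem_items d hwd hdnod []
    have hdc : d.contains v = true := by
      rw [PySem.Dict.contains_iff_mem_keys]
      simpa using PySem.Dict.mem_keys_of_mem_items d hwd
    rw [PySem.Dict.items_insert_of_contains g _ hc,
        PySem.Dict.items_insert_of_contains d _ hdc, hd, hgD, hdD]
    rw [List.filter_map]
    simp only [Function.comp_def]
    apply congrArg
    apply List.filter_congr
    intro p _
    by_cases h1 : p.1 = v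
    · simp [h1, hQ]
    · simp [h1]
  · -- v is a fresh key of g, hence of d
    have hc' : g.contains v = false := by simpa using hc
    have hdc : d.contains v = false := by
      by_contra h
      have hdc' : d.contains v = true := by simpa using h
      have hv := (PySem.Dict.contains_iff_mem_keys (d := d) (k := v)).mp hdc'
      simp only [PySem.Dict.keys, hd] at hv
      obtain ⟨p, hp, hp1⟩ := List.mem_map.mp hv
      have hpg : p ∈ g.items := (List.mem_filter.mp hp).1
      have : g.contains v = true := by
        rw [PySem.Dict.contains_iff_mem_keys]
        exact hp1 ▸ PySem.Dict.mem_keys_of_mem_items g hpg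
      simp [hc'] at this
    rw [PySem.Dict.items_insert_of_not_contains g _ hc',
        PySem.Dict.items_insert_of_not_contains d _ hdc,
        PySem.Dict.getD_of_not_contains g [] hc',
        PySem.Dict.getD_of_not_contains d [] hdc]
    rw [List.filter_append, hd]
    simp [hQ]

-- a modify at a key v with Q v = false leaves the key-filter by Q unchanged
theorem pv_step_false (g d : PySem.Dict Int (List Int)) (Q : Int → Bool) (v : Int) (i : Int)
    (hQ : Q v = false)
    (hd : d.items = g.items.filter (fun q => Q q.1)) :
    d.items = (g.modify v [] (· ++ [i])).items.filter (fun q => Q q.1) := by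
  simp only [PySem.Dict.modify]
  by_cases hc : g.contains v = true
  · rw [PySem.Dict.items_insert_of_contains g _ hc, List.filter_map]
    simp only [Function.comp_def]
    have h1 : g.items.filter (fun p => Q (if (p.1 == v) = true then ((v : Int), g.getD v [] ++ [i]) else p).1)
        = g.items.filter (fun q => Q q.1) := by
      apply List.filter_congr
      intro p _
      by_cases h1 : p.1 = v
      · simp [h1, hQ]
      · simp [h1]
    rw [h1, hd]
    apply Eq.symm
    have : ∀ p ∈ g.items.filter (fun q => Q q.1),
        (if (p.1 == v) = true then ((v : Int), g.getD v [] ++ [i]) else p) = p := by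
      intro p hp
      have hpq : Q p.1 = true := by simpa using (List.mem_filter.mp hp).2
      have : p.1 ≠ v := fun h => by rw [h, hQ] at hpq; exact absurd hpq (by simp)
      simp [this]
    calc (g.items.filter (fun q => Q q.1)).map
          (fun p => if (p.1 == v) = true then ((v : Int), g.getD v [] ++ [i]) else p)
        = (g.items.filter (fun q => Q q.1)).map id := List.map_congr_left this
      _ = g.items.filter (fun q => Q q.1) := List.map_id _
  · have hc' : g.contains v = false := by simpa using hc
    rw [PySem.Dict.items_insert_of_not_contains g _ hc', List.filter_append, hd]
    simp [hQ]

-- nodup keys are preserved by one modify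
theorem pv_nodup_modify (g : PySem.Dict Int (List Int)) (v : Int) (f : List Int → List Int)
    (hg : g.keys.Nodup) : (g.modify v [] f).keys.Nodup := by
  simp only [PySem.Dict.modify]
  by_cases hc : g.contains v = true
  · rw [PySem.Dict.keys_insert_of_contains g _ hc]; exact hg
  · have hc' : g.contains v = false := by simpa using hc
    rw [PySem.Dict.keys_insert_of_not_contains g _ hc']
    refine List.nodup_append.mpr ⟨hg, List.nodup_singleton v, ?_⟩
    intro a ha b hb
    simp only [List.mem_singleton] at hb
    subst hb
    intro hav
    subst hav
    exact absurd ((PySem.Dict.contains_iff_mem_keys g a).mpr ha) (by simp [hc'])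

-- the loop invariant: A's two dicts are the parity filters of B's combined grouping dict
theorem pv_inv (P : Int → Bool) (l : List (Int × Int)) :
    ∀ (ed od g : PySem.Dict Int (List Int)), g.keys.Nodup →
    ed.items = g.items.filter (fun q => P q.1) →
    od.items = g.items.filter (fun q => !P q.1) →
    (l.foldl (fun (st : PySem.Dict Int (List Int) × PySem.Dict Int (List Int)) p =>
        if P p.2 then (st.1.modify p.2 [] (· ++ [p.1]), st.2)
        else (st.1, st.2.modify p.2 [] (· ++ [p.1]))) (ed, od)).1.items
      = (l.foldl (fun d p => d.modify p.2 [] (· ++ [p.1])) g).items.filter (fun q => P q.1)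
    ∧ (l.foldl (fun (st : PySem.Dict Int (List Int) × PySem.Dict Int (List Int)) p =>
        if P p.2 then (st.1.modify p.2 [] (· ++ [p.1]), st.2)
        else (st.1, st.2.modify p.2 [] (· ++ [p.1]))) (ed, od)).2.items
      = (l.foldl (fun d p => d.modify p.2 [] (· ++ [p.1])) g).items.filter (fun q => !P q.1) := by
  induction l with
  | nil => intro ed od g _ h1 h2; exact ⟨h1, h2⟩
  | cons p l ih =>
    intro ed od g hg h1 h2
    simp only [List.foldl_cons]
    by_cases hp : P p.2 = true
    · rw [if_pos hp]
      exact ih (ed.modify p.2 [] (· ++ [p.1])) od (g.modify p.2 [] (· ++ [p.1]))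
        (pv_nodup_modify g p.2 _ hg)
        (pv_step_true g ed P p.2 p.1 hp hg h1)
        (pv_step_false g od (fun v => !P v) p.2 p.1 (by simp [hp]) h2)
    · have hp' : P p.2 = false := by simpa using hp
      rw [if_neg (by simp [hp'])]
      exact ih ed (od.modify p.2 [] (· ++ [p.1])) (g.modify p.2 [] (· ++ [p.1]))
        (pv_nodup_modify g p.2 _ hg)
        (pv_step_false g ed P p.2 p.1 hp' h1)
        (pv_step_true g od (fun v => !P v) p.2 p.1 (by simp [hp']) hg h2)

-- ===== VERDICT (by name: the statement is the Claim_ definition above) =====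
theorem create_even_odd_dict_spec : Claim_equal_create_even_odd_dict := by
  intro rv _
  unfold Spec_create_even_odd_dict create_even_odd_dict create_even_odd_dict_alt
  have h := pv_inv (fun v => PySem.Int.mod v 2 == 0) (PySem.List.enumerate rv)
    PySem.Dict.empty PySem.Dict.empty PySem.Dict.empty
    (by simp [PySem.Dict.keys, PySem.Dict.empty])
    (by simp [PySem.Dict.empty]) (by simp [PySem.Dict.empty])
  simp only at h ⊢
  exact Prod.ext h.1 h.2
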